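-- pv_equiv track=rewrite | github.com/Malchemis/POC-Python-DPLL | dp_baseline.py | find_superset_clauses
-- ===== SOURCE A (Python) =====
-- def find_superset_clauses(clauses: list) -> list:
--     """
--     Find clauses that are supersets of other clauses.
--
--     :param clauses: List of clauses.
--     :return: List of clauses that are supersets.
--     """
--     supersets = []
--     for clause in clauses:
--         for other_clause in clauses:
--             if clause != other_clause and all(elem in clause for elem in other_clause):
--                 supersets.append(clause)
--                 break
--     return supersets
-- ===== SOURCE B (Python) =====
-- def find_superset_clauses(clauses: list) -> list:
--     """
--     Find clauses that are supersets of other clauses.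
--
--     Inverted index: posting[e] = indices of clauses containing e; the candidate
--     supersets of clause d are the intersection of posting[e] over e in set(d).
--     """
--     n = len(clauses)
--     posting = {}
--     for i, clause in enumerate(clauses):
--         for e in set(clause):
--             posting.setdefault(e, set()).add(i)
--     full = set(range(n))
--     marked = [False] * n
--     for d in clauses:
--         cand = full
--         for e in set(d):
--             cand = cand & posting.get(e, set())
--         for i in cand:
--             if clauses[i] != d:
--                 marked[i] = True
--     return [clauses[i] for i in range(n) if marked[i]]
-- ===== Notes on version B (the rewrite author's own statement) =====
-- stated objective: faster
-- what changed: Replaces A's nested all-pairs subset scan by an inverted index (element -> set of clause indices): per-clause posting-list intersections visit only clauses sharing an element instead of all n clauses, with results marked in a flag array and emitted in one index-ordered pass.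
import Mathlib
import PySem

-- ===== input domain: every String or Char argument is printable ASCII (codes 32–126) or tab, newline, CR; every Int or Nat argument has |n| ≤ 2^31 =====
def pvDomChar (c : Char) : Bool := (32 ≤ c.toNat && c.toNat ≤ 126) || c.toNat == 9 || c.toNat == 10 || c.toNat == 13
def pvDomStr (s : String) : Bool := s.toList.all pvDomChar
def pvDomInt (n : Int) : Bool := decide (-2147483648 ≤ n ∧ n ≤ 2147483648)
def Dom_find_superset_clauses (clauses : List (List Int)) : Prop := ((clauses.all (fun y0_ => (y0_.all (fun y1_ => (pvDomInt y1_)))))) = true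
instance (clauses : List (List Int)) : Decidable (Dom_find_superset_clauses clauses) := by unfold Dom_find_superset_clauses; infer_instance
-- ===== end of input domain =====

-- B replaces A's quadratic all-pairs subset scan by an inverted index (element -> set of
-- clause indices) whose intersections give each clause's candidate supersets directly.

-- ===== PORT A =====
-- inner 'for other_clause in clauses: … append; break' loop of A
def pvInnerA (clause : List Int) : List (List Int) → List (List Int) → List (List Int)
  | [], supersets => supersets
  | other :: rest, supersets =>
    if clause ≠ other ∧ ∀ e ∈ other, e ∈ clause then supersets ++ [clause]
    else pvInnerA clause rest supersets

def find_superset_clauses (clauses : List (List Int)) : List (List Int) :=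
  clauses.foldl (fun supersets clause => pvInnerA clause clauses supersets) []

-- ===== PORT B =====
-- posting[e] = set of indices i with e in clauses[i]  ('posting.setdefault(e, set()).add(i)' = Dict.modify)
def pvPosting (clauses : List (List Int)) : PySem.Dict Int (PySem.Set Int) :=
  (PySem.List.enumerate clauses).foldl
    (fun posting ic =>
      (PySem.Set.ofList ic.2).foldl
        (fun posting e => posting.modify e PySem.Set.empty (fun s => PySem.Set.add s ic.1))
        posting)
    PySem.Dict.empty

-- 'cand = full; for e in set(d): cand = cand & posting.get(e, set())'
def pvCand (posting : PySem.Dict Int (PySem.Set Int)) (full : PySem.Set Int) (d : List Int) :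
    PySem.Set Int :=
  (PySem.Set.ofList d).foldl
    (fun cand e => PySem.Set.inter cand (posting.getD e PySem.Set.empty)) full

-- the 'for i in cand: marked[i] = True' loop only sets flags, so its result does not
-- depend on the (unmodelled) hash order of the set 'cand'
def find_superset_clauses_alt (clauses : List (List Int)) : List (List Int) :=
  let posting := pvPosting clauses
  let full : PySem.Set Int := PySem.Set.ofList (PySem.List.pyRange 0 (clauses.length : Int) 1)
  let marked := clauses.foldl
    (fun marked d =>
      (pvCand posting full d).foldl
        (fun marked i =>
          if PySem.List.pyGetD clauses i [] ≠ d then PySem.List.pySetD marked i true else marked)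
        marked)
    (List.replicate clauses.length false)
  ((PySem.List.pyRange 0 (clauses.length : Int) 1).filter
      (fun i => PySem.List.pyGetD marked i false)).map
    (fun i => PySem.List.pyGetD clauses i [])

-- ===== PRECONDITION & SPEC =====
def Spec_find_superset_clauses (clauses : List (List Int)) (out : List (List Int)) : Prop := out = find_superset_clauses_alt clauses
instance (clauses : List (List Int)) (out : List (List Int)) : Decidable (Spec_find_superset_clauses clauses out) := by unfold Spec_find_superset_clauses; infer_instance

-- ===== CLAIM (what is proved, stated in full; the proofs are below) =====
def Claim_equal_find_superset_clauses : Prop := ∀ (clauses : List (List Int)), Dom_find_superset_clauses clauses → Spec_find_superset_clauses clauses (find_superset_clauses clauses)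

-- ===== LEMMAS AND PROOFS =====

-- the common characterisation: a clause is kept iff some other clause is a subset of it
def pvP (clauses : List (List Int)) (c : List Int) : Bool :=
  decide (∃ d ∈ clauses, (∀ e ∈ d, e ∈ c) ∧ c ≠ d)

lemma pvInnerA_eq (clause : List Int) (cl : List (List Int)) (acc : List (List Int)) :
    pvInnerA clause cl acc =
      if ∃ other ∈ cl, clause ≠ other ∧ ∀ e ∈ other, e ∈ clause then acc ++ [clause] else acc := by
  induction cl with
  | nil => simp [pvInnerA]
  | cons o rest ih =>
    simp only [pvInnerA]
    by_cases h : clause ≠ o ∧ ∀ e ∈ o, e ∈ clause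
    · rw [if_pos h, if_pos ⟨o, List.mem_cons_self .., h⟩]
    · rw [if_neg h, ih]
      congr 1
      simp only [List.mem_cons, eq_iff_iff]
      constructor
      · rintro ⟨d, hd, hc⟩; exact ⟨d, Or.inr hd, hc⟩
      · rintro ⟨d, rfl | hd, hc⟩
        · exact absurd hc h
        · exact ⟨d, hd, hc⟩

lemma find_superset_clauses_eq_filter (clauses : List (List Int)) :
    find_superset_clauses clauses = clauses.filter (pvP clauses) := by
  unfold find_superset_clauses
  have h1 : clauses.foldl (fun supersets clause => pvInnerA clause clauses supersets) [] =
      clauses.foldl (fun acc c => if pvP clauses c then acc ++ [c] else acc) [] := by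
    apply PySem.List.foldl_congr_mem'
    intro c _ acc
    rw [pvInnerA_eq]
    by_cases h : ∃ d ∈ clauses, (∀ e ∈ d, e ∈ c) ∧ c ≠ d
    · have hb : pvP clauses c = true := by
        simp only [pvP, decide_eq_true_eq]; exact h
      have h' : ∃ other ∈ clauses, c ≠ other ∧ ∀ e ∈ other, e ∈ c := by
        obtain ⟨d, hd, h1, h2⟩ := h; exact ⟨d, hd, h2, h1⟩
      rw [if_pos h', hb, if_pos rfl]
    · have hb : pvP clauses c = false := by
        simp only [pvP, decide_eq_false_iff_not]; exact h
      rw [if_neg (fun hex => h (by obtain ⟨d, hd, h1, h2⟩ := hex; exact ⟨d, hd, h2, h1⟩)), hb]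
      simp
  rw [h1, PySem.List.foldl_append_if_eq_filter]
  simp

-- B side: membership in the posting lists
lemma pv_mem_inner_posting (j : Int) (l : List Int)
    (posting : PySem.Dict Int (PySem.Set Int)) (e i : Int) :
    i ∈ (l.foldl (fun p x => p.modify x PySem.Set.empty (fun s => PySem.Set.add s j))
          posting).getD e PySem.Set.empty ↔
      i ∈ posting.getD e PySem.Set.empty ∨ (e ∈ l ∧ i = j) := by
  induction l generalizing posting with
  | nil => simp
  | cons x l ih =>
    rw [List.foldl_cons, ih, PySem.Dict.getD_modify]
    split_ifs with hex
    · subst hex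
      rw [PySem.Set.mem_add]
      simp only [List.mem_cons]
      tauto
    · simp only [List.mem_cons]
      tauto

lemma pv_mem_posting_foldl (L : List (Int × List Int))
    (posting : PySem.Dict Int (PySem.Set Int)) (e i : Int) :
    i ∈ (L.foldl
          (fun p ic =>
            (PySem.Set.ofList ic.2).foldl
              (fun p x => p.modify x PySem.Set.empty (fun s => PySem.Set.add s ic.1)) p)
          posting).getD e PySem.Set.empty ↔
      i ∈ posting.getD e PySem.Set.empty ∨ ∃ q ∈ L, e ∈ q.2 ∧ i = q.1 := by
  induction L generalizing posting with
  | nil => simp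
  | cons q L ih =>
    rw [List.foldl_cons, ih, pv_mem_inner_posting]
    simp only [List.mem_cons, PySem.Set.mem_ofList]
    constructor
    · rintro (⟨h | ⟨h1, h2⟩⟩ | ⟨r, hr, h⟩)
      · exact Or.inl h
      · exact Or.inr ⟨q, Or.inl rfl, h1, h2⟩
      · exact Or.inr ⟨r, Or.inr hr, h⟩
    · rintro (h | ⟨r, (rfl | hr), h⟩)
      · exact Or.inl (Or.inl h)
      · exact Or.inl (Or.inr h)
      · exact Or.inr ⟨r, hr, h⟩

lemma pv_mem_posting (clauses : List (List Int)) (e i : Int) :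
    i ∈ (pvPosting clauses).getD e PySem.Set.empty ↔
      ∃ k : Nat, k < clauses.length ∧ i = (k : Int) ∧ e ∈ clauses.getD k [] := by
  unfold pvPosting
  rw [pv_mem_posting_foldl]
  simp only [PySem.Dict.getD_empty, PySem.Set.empty, List.not_mem_nil, false_or]
  constructor
  · rintro ⟨q, hq, he, hi⟩
    rw [PySem.List.mem_enumerate_iff] at hq
    obtain ⟨k, hk, rfl⟩ := hq
    exact ⟨k, hk, by simpa using hi,
      by simpa [List.getD_eq_getElem?_getD, List.getElem?_eq_getElem hk] using he⟩
  · rintro ⟨k, hk, rfl, he⟩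
    refine ⟨((k : Int), clauses.getD k []), ?_, he, rfl⟩
    rw [PySem.List.mem_enumerate_iff]
    exact ⟨k, hk, by simp [List.getD_eq_getElem?_getD, List.getElem?_eq_getElem hk]⟩

lemma pv_mem_cand_foldl (posting : PySem.Dict Int (PySem.Set Int)) (l : List Int)
    (cand0 : PySem.Set Int) (i : Int) :
    i ∈ l.foldl (fun c e => PySem.Set.inter c (posting.getD e PySem.Set.empty)) cand0 ↔
      i ∈ cand0 ∧ ∀ e ∈ l, i ∈ posting.getD e PySem.Set.empty := by
  induction l generalizing cand0 with
  | nil => simp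
  | cons x l ih =>
    rw [List.foldl_cons, ih]
    simp only [PySem.Set.mem_inter, List.mem_cons]
    constructor
    · rintro ⟨⟨h1, h2⟩, h3⟩
      exact ⟨h1, by rintro e (rfl | he); exacts [h2, h3 e he]⟩
    · rintro ⟨h1, h2⟩
      exact ⟨⟨h1, h2 x (Or.inl rfl)⟩, fun e he => h2 e (Or.inr he)⟩

lemma pv_mem_cand (clauses : List (List Int)) (d : List Int) (i : Int) :
    i ∈ pvCand (pvPosting clauses)
        (PySem.Set.ofList (PySem.List.pyRange 0 (clauses.length : Int) 1)) d ↔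
      ∃ k : Nat, k < clauses.length ∧ i = (k : Int) ∧ ∀ e ∈ d, e ∈ clauses.getD k [] := by
  unfold pvCand
  rw [pv_mem_cand_foldl]
  simp only [PySem.Set.mem_ofList, PySem.List.mem_pyRange_one]
  constructor
  · rintro ⟨⟨h0, hn⟩, hall⟩
    refine ⟨i.toNat, by omega, by omega, ?_⟩
    intro e he
    obtain ⟨k, hk, hik, hek⟩ := (pv_mem_posting clauses e i).1 (hall e he)
    have : i.toNat = k := by omega
    rw [this]; exact hek
  · rintro ⟨k, hk, rfl, hall⟩
    refine ⟨⟨by omega, by omega⟩, ?_⟩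
    intro e he
    exact (pv_mem_posting clauses e k).2 ⟨k, hk, rfl, hall e he⟩

-- the marking pass
lemma pv_markInner_length (clauses : List (List Int)) (d : List Int) (s : List Int)
    (m : List Bool) :
    (s.foldl
        (fun m i =>
          if PySem.List.pyGetD clauses i [] ≠ d then PySem.List.pySetD m i true else m)
        m).length = m.length := by
  induction s generalizing m with
  | nil => rfl
  | cons j s ih =>
    rw [List.foldl_cons]
    split
    · rw [ih, PySem.List.length_pySetD]
    · rw [ih]

lemma pv_markInner_getD (clauses : List (List Int)) (d : List Int) (s : List Int)
    (m : List Bool) (hs : ∀ j ∈ s, ∃ k' : Nat, k' < m.length ∧ j = (k' : Int)) (k : Nat) :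
    (s.foldl
        (fun m i =>
          if PySem.List.pyGetD clauses i [] ≠ d then PySem.List.pySetD m i true else m)
        m).getD k false =
      (m.getD k false ||
        decide ((k : Int) ∈ s ∧ PySem.List.pyGetD clauses (k : Int) [] ≠ d)) := by
  induction s generalizing m with
  | nil => simp
  | cons j s ih =>
    obtain ⟨k', hk', rfl⟩ := hs j (List.mem_cons_self ..)
    rw [List.foldl_cons]
    have hs' : ∀ j ∈ s, ∃ k2 : Nat, k2 < m.length ∧ j = (k2 : Int) :=
      fun j hj => hs j (List.mem_cons_of_mem _ hj)
    by_cases hc : PySem.List.pyGetD clauses (k' : Int) [] ≠ d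
    · rw [if_pos hc, PySem.List.pySetD_natCast,
        ih _ (by
          intro j hj
          obtain ⟨k2, hk2, rfl⟩ := hs' j hj
          exact ⟨k2, by rwa [List.length_set], rfl⟩)]
      have hget : (m.set k' true).getD k false =
          (if k = k' then true else m.getD k false) := by
        by_cases hkk : k = k'
        · subst hkk
          simp [List.getD_eq_getElem?_getD, List.getElem?_set, hk']
        · simp [List.getD_eq_getElem?_getD, List.getElem?_set, Ne.symm hkk, hkk]
      rw [hget]
      by_cases hkk : k = k'
      · subst hkk
        have hc' : ¬clauses[k]?.getD [] = d := by
          simpa [List.getD_eq_getElem?_getD] using hc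
        simp [List.mem_cons, hc']
      · have hne : ((k : Nat) : Int) ≠ ((k' : Nat) : Int) :=
          fun h => hkk (by exact_mod_cast h)
        simp [hkk, List.mem_cons, hne]
    · rw [if_neg hc, ih _ hs']
      by_cases hkk : k = k'
      · subst hkk
        have hd : clauses[k]?.getD [] = d := by
          have := not_not.1 hc
          simpa [List.getD_eq_getElem?_getD] using this
        simp [List.mem_cons, hd]
      · have hne : ((k : Nat) : Int) ≠ ((k' : Nat) : Int) :=
          fun h => hkk (by exact_mod_cast h)
        simp [List.mem_cons, hne]

lemma pv_markOuter_getD (clauses : List (List Int)) (cls : List (List Int)) (m : List Bool)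
    (hm : m.length = clauses.length) (k : Nat) :
    ((cls.foldl
        (fun m d =>
          (pvCand (pvPosting clauses)
              (PySem.Set.ofList (PySem.List.pyRange 0 (clauses.length : Int) 1)) d).foldl
            (fun m i =>
              if PySem.List.pyGetD clauses i [] ≠ d then PySem.List.pySetD m i true else m)
            m)
        m).getD k false) =
      (m.getD k false ||
        decide (∃ d ∈ cls, k < clauses.length ∧ (∀ e ∈ d, e ∈ clauses.getD k []) ∧
          PySem.List.pyGetD clauses (k : Int) [] ≠ d)) := by
  induction cls generalizing m with
  | nil => simp
  | cons d cls ih =>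
    rw [List.foldl_cons,
      ih _ (by rw [pv_markInner_length, hm]),
      pv_markInner_getD clauses d _ m
        (by
          intro j hj
          obtain ⟨k2, hk2, rfl, _⟩ := (pv_mem_cand clauses d j).1 hj
          exact ⟨k2, by omega, rfl⟩) k]
    have hcand : (k : Int) ∈ pvCand (pvPosting clauses)
        (PySem.Set.ofList (PySem.List.pyRange 0 (clauses.length : Int) 1)) d ↔
        (k < clauses.length ∧ ∀ e ∈ d, e ∈ clauses.getD k []) := by
      rw [pv_mem_cand]
      constructor
      · rintro ⟨k2, h1, h2, h3⟩
        have : k = k2 := by omega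
        subst this; exact ⟨h1, h3⟩
      · rintro ⟨h1, h2⟩; exact ⟨k, h1, rfl, h2⟩
    have hiff : (((k : Int) ∈ pvCand (pvPosting clauses)
          (PySem.Set.ofList (PySem.List.pyRange 0 (clauses.length : Int) 1)) d ∧
          PySem.List.pyGetD clauses (k : Int) [] ≠ d) ∨
        (∃ d' ∈ cls, k < clauses.length ∧ (∀ e ∈ d', e ∈ clauses.getD k []) ∧
          PySem.List.pyGetD clauses (k : Int) [] ≠ d')) ↔
        (∃ d' ∈ d :: cls, k < clauses.length ∧ (∀ e ∈ d', e ∈ clauses.getD k []) ∧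
          PySem.List.pyGetD clauses (k : Int) [] ≠ d') := by
      rw [hcand]
      constructor
      · rintro (⟨⟨h1, h2⟩, h3⟩ | ⟨d', hd', h⟩)
        · exact ⟨d, List.mem_cons_self .., h1, h2, h3⟩
        · exact ⟨d', List.mem_cons_of_mem _ hd', h⟩
      · rintro ⟨d', hd', h1, h2, h3⟩
        rcases List.mem_cons.1 hd' with rfl | hd'
        · exact Or.inl ⟨⟨h1, h2⟩, h3⟩
        · exact Or.inr ⟨d', hd', h1, h2, h3⟩
    rw [Bool.or_assoc, ← Bool.decide_or, decide_eq_decide.2 hiff]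

-- index comprehension = filter on the list itself
lemma pv_filter_map_range_getD (l : List (List Int)) (f : List Int → Bool) :
    ((List.range l.length).filter (fun k => f (l.getD k []))).map (fun k => l.getD k []) =
      l.filter f := by
  induction l with
  | nil => simp
  | cons x l ih =>
    rw [List.length_cons, List.range_succ_eq_map]
    cases hfx : f x with
    | true =>
      simp [List.filter_cons, hfx, List.filter_map, List.map_map, Function.comp_def]
      simpa [List.getD_eq_getElem?_getD] using ih
    | false =>
      simp [List.filter_cons, hfx, List.filter_map, List.map_map, Function.comp_def]
      simpa [List.getD_eq_getElem?_getD] using ih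

lemma pv_filter_map_pyRange (l : List (List Int)) (g : Int → Bool) (f : List Int → Bool)
    (hg : ∀ k : Nat, k < l.length → g ((k : Nat) : Int) = f (l.getD k [])) :
    ((PySem.List.pyRange 0 (l.length : Int) 1).filter g).map
        (fun i => PySem.List.pyGetD l i []) = l.filter f := by
  rw [PySem.List.pyRange_one]
  simp only [sub_zero, Int.toNat_natCast, List.filter_map, List.map_map, Function.comp_def,
    zero_add]
  rw [List.filter_congr (fun k hk => by rw [hg k (List.mem_range.1 hk)] :
        ∀ k ∈ List.range l.length, (g (k : Int)) = f (l.getD k []))]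
  rw [List.map_congr_left (fun k hk => by
        rw [PySem.List.pyGetD_natCast] :
        ∀ k ∈ (List.range l.length).filter (fun k => f (l.getD k [])),
          PySem.List.pyGetD l ((k : Nat) : Int) [] = l.getD k [])]
  exact pv_filter_map_range_getD l f

lemma find_superset_clauses_alt_eq_filter (clauses : List (List Int)) :
    find_superset_clauses_alt clauses = clauses.filter (pvP clauses) := by
  unfold find_superset_clauses_alt
  refine pv_filter_map_pyRange clauses _ (pvP clauses) ?_
  intro k hk
  rw [PySem.List.pyGetD_natCast, pv_markOuter_getD clauses clauses _ (by simp) k]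
  have h0 : (List.replicate clauses.length false).getD k false = false := by
    simp [List.getD_eq_getElem?_getD, List.getElem?_replicate, hk]
  rw [h0, Bool.false_or]
  unfold pvP
  rw [decide_eq_decide]
  constructor
  · rintro ⟨d, hd, _, h2, h3⟩
    exact ⟨d, hd, h2, by rwa [PySem.List.pyGetD_natCast] at h3⟩
  · rintro ⟨d, hd, h2, h3⟩
    exact ⟨d, hd, hk, h2, by rwa [PySem.List.pyGetD_natCast]⟩

-- ===== VERDICT (by name: the statement is the Claim_ definition above) =====
theorem find_superset_clauses_spec : Claim_equal_find_superset_clauses := by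
  intro clauses _
  unfold Spec_find_superset_clauses
  rw [find_superset_clauses_eq_filter, find_superset_clauses_alt_eq_filter]
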